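-- pv_equiv track=rewrite | github.com/pterodragon/programming | C++/codeforces/Flowers/temp.py | gen_combination
-- ===== SOURCE A (Python) =====
-- def gen_combination(z, k):
--     if z <= 0:
--         yield ''
--         return
--     for s in gen_combination(z - 1, k):
--         yield 'r' + s
--     if z >= k:
--         for s in gen_combination(z - k, k):
--             yield k * 'w' + s
-- ===== SOURCE B (Python) =====
-- def gen_combination(z, k):
--     stack = [(z, '')]
--     while stack:
--         rem, pre = stack.pop()
--         if rem <= 0:
--             yield pre
--         else:
--             if rem >= k:
--                 stack.append((rem - k, pre + k * 'w'))
--             stack.append((rem - 1, pre + 'r'))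
-- ===== Notes on version B (the rewrite author's own statement) =====
-- stated objective: alternative
-- what changed: Replaced A's recursive generator with an iterative DFS using an explicit stack of (remaining, prefix) pairs, pushing the w-block child before the r child so the pop order reproduces A's pre-order yield order exactly.
import Mathlib
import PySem

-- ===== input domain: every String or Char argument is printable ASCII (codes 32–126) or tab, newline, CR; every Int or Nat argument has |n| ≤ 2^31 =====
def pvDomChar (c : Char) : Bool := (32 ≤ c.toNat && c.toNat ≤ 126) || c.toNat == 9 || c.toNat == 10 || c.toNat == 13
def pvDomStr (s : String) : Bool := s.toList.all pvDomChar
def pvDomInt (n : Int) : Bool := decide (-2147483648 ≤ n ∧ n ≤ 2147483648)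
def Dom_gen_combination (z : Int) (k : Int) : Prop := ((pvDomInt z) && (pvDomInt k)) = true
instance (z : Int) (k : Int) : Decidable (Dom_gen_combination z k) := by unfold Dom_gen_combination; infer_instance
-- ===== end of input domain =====

-- B replaces A's recursive generator with an explicit-stack DFS loop producing the same
-- strings in the same order (objective: alternative decomposition, same cost).

-- k * 'w' in Python: empty for k ≤ 0, else k copies of 'w'
def pvWBlock (k : Int) : String := String.ofList (List.replicate k.toNat 'w')

-- ===== PORT A =====
-- Literal transliteration of A (recursive, collecting the yields in order);
-- the fuel argument only makes the recursion total: with k ≥ 1 it never runs out.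
def genAFuel (fuel : Nat) (z : Int) (k : Int) : List String :=
  match fuel with
  | 0 => []
  | fuel + 1 =>
    if z ≤ 0 then [""]
    else
      (genAFuel fuel (z - 1) k).map (fun s => "r" ++ s) ++
      (if z ≥ k then (genAFuel fuel (z - k) k).map (fun s => pvWBlock k ++ s) else [])

def gen_combination (z : Int) (k : Int) : List String :=
  genAFuel (z.toNat + 1) z k

-- ===== PORT B =====
-- Literal transliteration of B: explicit stack of (remaining, prefix) pairs, head = top;
-- the fuel only makes the loop total (2^(z+1) bounds the number of pops when k ≥ 1).
def loopB (fuel : Nat) (k : Int) (stack : List (Int × String)) (acc : List String) : List String :=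
  match fuel, stack with
  | 0, _ => acc
  | _, [] => acc
  | fuel + 1, (rem, pre) :: rest =>
    if rem ≤ 0 then loopB fuel k rest (acc ++ [pre])
    else
      loopB fuel k
        ((rem - 1, pre ++ "r") ::
          (if rem ≥ k then (rem - k, pre ++ pvWBlock k) :: rest else rest))
        acc

def gen_combination_alt (z : Int) (k : Int) : List String :=
  loopB (2 ^ (z.toNat + 1)) k [(z, "")] []

-- ===== PRECONDITION & SPEC =====
-- Pre_ excludes (a) z > 0 with k ≤ 0, where A's recursion never bottoms out, and
-- (b) z ≥ 1000, where A's recursion depth (≈ z) exceeds CPython's default recursion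
-- limit: in both cases consuming the generator raises RecursionError, A returns no list.
def Pre_gen_combination (z : Int) (k : Int) : Prop := (z ≤ 0 ∨ 1 ≤ k) ∧ z < 1000
instance (z : Int) (k : Int) : Decidable (Pre_gen_combination z k) := by
  unfold Pre_gen_combination; infer_instance

def pvWitness_gen_combination : Int × Int := (5, 2)

def Spec_gen_combination (z : Int) (k : Int) (out : List String) : Prop := out = gen_combination_alt z k
instance (z : Int) (k : Int) (out : List String) : Decidable (Spec_gen_combination z k out) := by unfold Spec_gen_combination; infer_instance

-- ===== CLAIM (what is proved, stated in full; the proofs are below) =====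
def Claim_equal_gen_combination : Prop := ∀ (z : Int) (k : Int), Dom_gen_combination z k → Pre_gen_combination z k → Spec_gen_combination z k (gen_combination z k)

-- ===== LEMMAS AND PROOFS =====

-- Proof-side reference function: the list A yields, defined by well-founded recursion.
-- 'max k 1' only serves termination; for k ≥ 1 it coincides with A's recursion.
def genRef (k : Int) (z : Int) : List String :=
  if _h : z ≤ 0 then [""]
  else
    (genRef k (z - 1)).map (fun s => "r" ++ s) ++
    (if z ≥ k then (genRef k (z - max k 1)).map (fun s => pvWBlock k ++ s) else [])
termination_by z.toNat
decreasing_by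
  · omega
  · have : 1 ≤ max k 1 := le_max_right _ _
    omega

-- number of pops B's loop spends on one stack entry with remaining z
def nodes (k : Int) (z : Int) : Nat :=
  if _h : z ≤ 0 then 1
  else
    1 + nodes k (z - 1) +
    (if z ≥ k then nodes k (z - max k 1) else 0)
termination_by z.toNat
decreasing_by
  · omega
  · have : 1 ≤ max k 1 := le_max_right _ _
    omega

theorem nodes_le_pow (k : Int) :
    ∀ (n : Nat) (z : Int), z.toNat ≤ n → nodes k z ≤ 2 ^ (z.toNat + 1) - 1 := by
  intro n
  induction n with
  | zero =>
    intro z h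
    have hz : z ≤ 0 := by omega
    have hp : 1 ≤ (2:ℕ) ^ z.toNat := Nat.one_le_two_pow
    have hs : (2:ℕ) ^ (z.toNat + 1) = 2 * 2 ^ z.toNat := by rw [pow_succ]; ring
    rw [nodes]; simp [hz]; omega
  | succ m ih =>
    intro z h
    rw [nodes]
    by_cases hz : z ≤ 0
    · have hp : 1 ≤ (2:ℕ) ^ z.toNat := Nat.one_le_two_pow
      have hs : (2:ℕ) ^ (z.toNat + 1) = 2 * 2 ^ z.toNat := by rw [pow_succ]; ring
      simp [hz]; omega
    · have hmax : 1 ≤ max k 1 := le_max_right _ _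
      have b1 := ih (z - 1) (by omega)
      have b2 := ih (z - max k 1) (by omega)
      have p1 : (2:ℕ) ^ ((z - 1).toNat + 1) ≤ 2 ^ z.toNat :=
        Nat.pow_le_pow_right (by norm_num) (by omega)
      have p2 : (2:ℕ) ^ ((z - max k 1).toNat + 1) ≤ 2 ^ z.toNat :=
        Nat.pow_le_pow_right (by norm_num) (by omega)
      have hs : (2:ℕ) ^ (z.toNat + 1) = 2 * 2 ^ z.toNat := by rw [pow_succ]; ring
      have hpos : 1 ≤ (2:ℕ) ^ z.toNat := Nat.one_le_two_pow
      simp only [dif_neg hz]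
      split <;> omega

theorem nodes_pos (k : Int) (z : Int) : 1 ≤ nodes k z := by
  rw [nodes]
  split
  · omega
  · split <;> omega

-- A's fueled port computes genRef once the fuel covers the depth (k ≥ 1)
theorem genAFuel_eq_ref (k : Int) (hk : 1 ≤ k) :
    ∀ (n : Nat) (z : Int), z.toNat + 1 ≤ n → genAFuel n z k = genRef k z := by
  intro n
  induction n with
  | zero => intro z h; omega
  | succ m ih =>
    intro z hfu
    rw [genAFuel, genRef]
    by_cases hz : z ≤ 0
    · simp [hz]
    · have hmax : max k 1 = k := by omega
      simp only [if_neg hz, dif_neg hz]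
      rw [hmax, ih (z - 1) (by omega)]
      by_cases hzk : z ≥ k
      · simp [hzk, ih (z - k) (by omega)]
      · simp [hzk]

-- the stack invariant of B's loop: enough fuel ⇒ the loop appends, per stack entry,
-- genRef of the remaining length prefixed by the entry's prefix (k ≥ 1)
theorem loopB_invariant (k : Int) (hk : 1 ≤ k) :
    ∀ (n : Nat) (stack : List (Int × String)) (acc : List String),
      (stack.map (fun p => nodes k p.1)).sum ≤ n →
      loopB n k stack acc =
        acc ++ stack.flatMap (fun p => (genRef k p.1).map (fun s => p.2 ++ s)) := by
  intro n
  induction n with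
  | zero =>
    intro stack acc h
    match stack with
    | [] => simp [loopB]
    | (rem, pre) :: rest =>
      exfalso
      have := nodes_pos k rem
      simp at h
      omega
  | succ m ih =>
    intro stack acc h
    match stack with
    | [] => simp [loopB]
    | (rem, pre) :: rest =>
      have hmax : max k 1 = k := by omega
      simp only [List.map_cons, List.sum_cons] at h
      rw [loopB]
      by_cases hr : rem ≤ 0
      · rw [if_pos hr]
        rw [ih rest (acc ++ [pre]) (by have := nodes_pos k rem; omega)]
        have : genRef k rem = [""] := by rw [genRef]; simp [hr]
        simp [this]
      · rw [if_neg hr]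
        have hnodes : nodes k rem =
            1 + nodes k (rem - 1) + (if rem ≥ k then nodes k (rem - k) else 0) := by
          rw [nodes]; simp [hr, hmax]
        have href : genRef k rem =
            (genRef k (rem - 1)).map (fun s => "r" ++ s) ++
            (if rem ≥ k then (genRef k (rem - k)).map (fun s => pvWBlock k ++ s) else []) := by
          rw [genRef]; simp [hr, hmax]
        by_cases hzk : rem ≥ k
        · rw [if_pos hzk]
          rw [ih _ acc (by simp only [List.map_cons, List.sum_cons]; rw [hnodes] at h; simp [hzk] at h; omega)]
          simp only [List.flatMap_cons, href, if_pos hzk, List.map_append, List.map_map]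
          simp [Function.comp_def, String.append_assoc]
        · rw [if_neg hzk]
          rw [ih _ acc (by simp only [List.map_cons, List.sum_cons]; rw [hnodes] at h; simp [hzk] at h; omega)]
          simp only [List.flatMap_cons, href, if_neg hzk, List.map_append, List.map_map]
          simp [Function.comp_def, String.append_assoc]

-- ===== VERDICT (by name: the statement is the Claim_ definition above) =====
theorem gen_combination_spec : Claim_equal_gen_combination := by
  intro z k _ hpre
  unfold Spec_gen_combination gen_combination gen_combination_alt
  by_cases hz : z ≤ 0
  · have hzt : z.toNat = 0 := by omega
    rw [hzt]
    norm_num [loopB, genAFuel, hz]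
  · have hk : 1 ≤ k := hpre.1.resolve_left hz
    rw [genAFuel_eq_ref k hk _ z (by omega)]
    rw [loopB_invariant k hk _ [(z, "")] []
      (by
        have h1 := nodes_le_pow k z.toNat z (le_refl _)
        have h2 : 1 ≤ (2:ℕ) ^ (z.toNat + 1) := Nat.one_le_two_pow
        simpa using by omega)]
    simp
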